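-- pv_equiv track=rewrite | github.com/cremadoro-tech/order-processor | ai-management/scripts/pen-converter/convert-pen.py | lookup_master
-- ===== SOURCE A (Python) =====
-- def lookup_master(value, master_dict, fuzzy=False):
--     """マスターデータから値を検索（完全一致→前方一致）"""
--     if not value:
--         return ''
--     if value in master_dict:
--         return master_dict[value]
--     if fuzzy:
--         # ハイフン区切りで末尾を削って検索
--         parts = value.split('-')
--         for i in range(len(parts) - 1, 0, -1):
--             prefix = '-'.join(parts[:i])
--             if prefix in master_dict:
--                 return master_dict[prefix]
--     return ''
-- ===== SOURCE B (Python) =====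
-- def lookup_master(value, master_dict, fuzzy=False):
--     """Exact lookup; the fuzzy fallback is a single scan over the dict that
--     keeps the longest key K with value.startswith(K + '-'), instead of
--     probing each hyphen prefix of value against the dict."""
--     if not value:
--         return ''
--     if value in master_dict:
--         return master_dict[value]
--     if fuzzy:
--         best = None
--         for key, val in master_dict.items():
--             if value.startswith(key + '-') and (best is None or len(key) > len(best[0])):
--                 best = (key, val)
--         if best is not None:
--             return best[1]
--     return ''
-- ===== Notes on version B (the rewrite author's own statement) =====
-- stated objective: alternative
-- what changed: A probes each hyphen prefix of value (longest first) against the dict; B instead makes a single scan over the dict items keeping the longest key K such that value.startswith(K + '-'), never splitting value at all.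
import Mathlib
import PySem

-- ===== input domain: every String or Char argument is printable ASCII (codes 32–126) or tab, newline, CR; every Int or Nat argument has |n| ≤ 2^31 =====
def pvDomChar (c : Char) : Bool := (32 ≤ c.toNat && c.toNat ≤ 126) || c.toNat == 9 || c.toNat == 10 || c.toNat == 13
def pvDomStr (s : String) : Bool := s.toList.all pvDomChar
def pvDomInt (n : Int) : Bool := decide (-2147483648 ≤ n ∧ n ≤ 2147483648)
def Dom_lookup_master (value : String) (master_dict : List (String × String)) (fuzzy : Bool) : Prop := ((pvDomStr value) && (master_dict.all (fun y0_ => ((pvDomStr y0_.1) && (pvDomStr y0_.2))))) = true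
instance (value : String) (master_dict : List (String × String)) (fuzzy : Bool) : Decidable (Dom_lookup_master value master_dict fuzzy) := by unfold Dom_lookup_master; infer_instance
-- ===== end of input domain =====

-- B replaces A's probe-each-hyphen-prefix-against-the-dict loop by a single scan over the
-- dict items keeping the longest key K with value.startswith(K + '-') (objective: alternative).

-- ===== PORT A =====
-- the 'for i in range(len(parts)-1, 0, -1)' loop with early return
def lookup_master_fuzzyA (d : PySem.Dict String String) (parts : List String) : List Int → String
  | [] => ""
  | i :: rest =>
      match d.get? (PySem.Str.join "-" (PySem.List.slice parts none (some i))) with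
      | some v => v
      | none => lookup_master_fuzzyA d parts rest

def lookup_master (value : String) (master_dict : List (String × String)) (fuzzy : Bool) : String :=
  if value = "" then ""
  else
    let d := PySem.Dict.ofList master_dict
    match d.get? value with
    | some v => v
    | none =>
      if fuzzy then
        let parts := (PySem.Str.split? value "-").getD []
        lookup_master_fuzzyA d parts (PySem.List.pyRange ((parts.length : Int) - 1) 0 (-1))
      else ""

-- ===== PORT B =====
-- body of B's 'for key, val in master_dict.items()' loop: keep (key, val) if the key
-- is a hyphen-prefix of value and strictly longer than the best so far
def lookup_master_bestStep (value : String) (b : Option (String × String)) (p : String × String) :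
    Option (String × String) :=
  if PySem.Str.startswith value (p.1 ++ "-")
      && (match b with
          | none => true
          | some q => decide (PySem.Str.len q.1 < PySem.Str.len p.1)) then
    some p
  else b

def lookup_master_alt (value : String) (master_dict : List (String × String)) (fuzzy : Bool) : String :=
  if value = "" then ""
  else
    let d := PySem.Dict.ofList master_dict
    match d.get? value with
    | some v => v
    | none =>
      if fuzzy then
        match d.items.foldl (lookup_master_bestStep value) none with
        | some p => p.2
        | none => ""
      else ""

-- ===== PRECONDITION & SPEC =====
def Spec_lookup_master (value : String) (master_dict : List (String × String)) (fuzzy : Bool) (out : String) : Prop := out = lookup_master_alt value master_dict fuzzy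
instance (value : String) (master_dict : List (String × String)) (fuzzy : Bool) (out : String) : Decidable (Spec_lookup_master value master_dict fuzzy out) := by unfold Spec_lookup_master; infer_instance

-- ===== CLAIM (what is proved, stated in full; the proofs are below) =====
def Claim_equal_lookup_master : Prop := ∀ (value : String) (master_dict : List (String × String)) (fuzzy : Bool), Dom_lookup_master value master_dict fuzzy → Spec_lookup_master value master_dict fuzzy (lookup_master value master_dict fuzzy)

-- ===== LEMMAS AND PROOFS =====

def pvSplit : List Char → List (List Char)
  | [] => [[]]
  | c :: cs =>
      if c = '-' then [] :: pvSplit cs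
      else
        match pvSplit cs with
        | [] => [[c]]
        | p :: ps => (c :: p) :: ps

theorem pvSplit_ne_nil (cs : List Char) : pvSplit cs ≠ [] := by
  cases cs with
  | nil => simp [pvSplit]
  | cons c cs =>
      simp only [pvSplit]
      split_ifs
      · simp
      · cases pvSplit cs <;> simp

theorem go_spec : ∀ (fuel : Nat) (l cur acc : List _), l.length < fuel →
    PySem.Chars.splitOn.go ['-'] fuel l cur acc
      = acc.reverse ++ ((pvSplit l).modifyHead (cur.reverse ++ ·)) := by
  intro fuel
  induction fuel with
  | zero => intro l cur acc h; omega
  | succ fuel ih =>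
      intro l cur acc h
      cases l with
      | nil => simp [PySem.Chars.splitOn.go, pvSplit]
      | cons c rest =>
          rw [PySem.Chars.splitOn.go]
          by_cases hc : c = '-'
          · subst hc
            have hpre : List.isPrefixOf ['-'] ('-' :: rest) = true := by
              simp [List.isPrefixOf]
            rw [if_pos hpre]
            simp only [List.length_cons] at h
            rw [ih _ _ _ (by simpa using Nat.lt_of_succ_lt_succ h)]
            simp [pvSplit]
            cases hp : pvSplit rest with
            | nil => exact absurd hp (pvSplit_ne_nil rest)
            | cons p ps => simp
          · have hpre : List.isPrefixOf ['-'] (c :: rest) = false := by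
              simp [List.isPrefixOf]; exact fun h' => hc h'.symm
            rw [if_neg (by simp [hpre])]
            simp only [List.length_cons] at h
            rw [ih _ _ _ (Nat.lt_of_succ_lt_succ h)]
            simp only [pvSplit, if_neg hc]
            cases hp : pvSplit rest with
            | nil => exact absurd hp (pvSplit_ne_nil rest)
            | cons p ps => simp

theorem splitOn_eq_pvSplit (cs : List Char) :
    PySem.Chars.splitOn cs ['-'] = pvSplit cs := by
  rw [PySem.Chars.splitOn, go_spec _ _ _ _ (by omega)]
  cases hp : pvSplit cs with
  | nil => exact absurd hp (pvSplit_ne_nil cs)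
  | cons p ps => simp

theorem join_cons_head (c : Char) (p : List Char) (t : List (List Char)) :
    PySem.Chars.join ['-'] ((c :: p) :: t) = c :: PySem.Chars.join ['-'] (p :: t) := by
  cases t with
  | nil => simp [PySem.Chars.join_singleton]
  | cons q t' => simp [PySem.Chars.join_cons_cons]


theorem take_join_cons (c : Char) (p : List Char) (ps : List (List Char)) (i : Nat) (h : 1 ≤ i) :
    PySem.Chars.join ['-'] (((c :: p) :: ps).take i)
      = c :: PySem.Chars.join ['-'] ((p :: ps).take i) := by
  cases i with
  | zero => omega
  | succ j => simp only [List.take_succ_cons]; exact join_cons_head c p (ps.take j)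

theorem prefix_char (cs : List Char) : ∀ ks : List Char,
    (ks ++ ['-'] <+: cs) ↔
      ∃ i, 1 ≤ i ∧ i < (pvSplit cs).length ∧ ks = PySem.Chars.join ['-'] ((pvSplit cs).take i) := by
  induction cs with
  | nil =>
      intro ks
      constructor
      · intro h
        have := h.length_le
        simp at this
      · rintro ⟨i, h1, h2, -⟩
        simp [pvSplit] at h2
        omega
  | cons c cs ih =>
      intro ks
      by_cases hc : c = '-'
      · subst hc
        have hsplit : pvSplit ('-' :: cs) = [] :: pvSplit cs := by simp [pvSplit]
        rw [hsplit]
        have hlen : 1 ≤ (pvSplit cs).length := List.length_pos_of_ne_nil (pvSplit_ne_nil cs)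
        cases ks with
        | nil =>
            constructor
            · intro _
              refine ⟨1, le_refl _, by simp; omega, by simp [PySem.Chars.join_singleton]⟩
            · intro _
              simp
        | cons k0 ks' =>
            rw [List.cons_append, List.cons_prefix_cons]
            constructor
            · rintro ⟨hk0, hpre⟩
              obtain ⟨i, h1, h2, h3⟩ := (ih ks').mp hpre
              refine ⟨i + 1, by omega, by simp; omega, ?_⟩
              have hne : (pvSplit cs).take i ≠ [] := by
                have : ((pvSplit cs).take i).length = i := by
                  rw [List.length_take]; omega
                intro hnil; rw [hnil] at this; simp at this; omega
              cases hq : (pvSplit cs).take i with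
              | nil => exact absurd hq hne
              | cons q t =>
                  rw [List.take_succ_cons, hq, PySem.Chars.join_cons_cons]
                  simp only [List.nil_append]
                  rw [hk0, h3, hq]
                  rfl
            · rintro ⟨i, h1, h2, h3⟩
              cases i with
              | zero => omega
              | succ j =>
                  cases j with
                  | zero =>
                      simp [PySem.Chars.join_singleton] at h3
                  | succ j' =>
                      rw [List.take_succ_cons] at h3
                      have hne : (pvSplit cs).take (j' + 1) ≠ [] := by
                        have hl : ((pvSplit cs).take (j' + 1)).length = j' + 1 := by
                          rw [List.length_take]; simp at h2; omega
                        intro hnil; rw [hnil] at hl; simp at hl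
                      cases hq : (pvSplit cs).take (j' + 1) with
                      | nil => exact absurd hq hne
                      | cons q t =>
                          rw [hq, PySem.Chars.join_cons_cons] at h3
                          simp only [List.nil_append] at h3
                          rw [show (['-'] : List Char) ++ PySem.Chars.join ['-'] (q :: t)
                              = '-' :: PySem.Chars.join ['-'] (q :: t) from rfl,
                            List.cons_eq_cons] at h3
                          refine ⟨h3.1, (ih ks').mpr ⟨j' + 1, by omega, by simp at h2; omega, ?_⟩⟩
                          rw [hq]; exact h3.2
      · have hsplit : pvSplit (c :: cs) = match pvSplit cs with
          | [] => [[c]]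
          | p :: ps => (c :: p) :: ps := by simp [pvSplit, hc]
        cases hp : pvSplit cs with
        | nil => exact absurd hp (pvSplit_ne_nil cs)
        | cons p ps =>
        rw [hp] at hsplit
        rw [hsplit]
        cases ks with
        | nil =>
            simp only [List.nil_append]
            constructor
            · intro h
              rw [List.cons_prefix_cons] at h
              exact absurd h.1.symm hc
            · rintro ⟨i, h1, h2, h3⟩
              rw [take_join_cons c p ps i h1] at h3
              simp at h3
        | cons k0 ks' =>
            rw [List.cons_append, List.cons_prefix_cons]
            constructor
            · rintro ⟨hk0, hpre⟩
              obtain ⟨i, h1, h2, h3⟩ := (ih ks').mp hpre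
              rw [hp] at h2 h3
              refine ⟨i, h1, by simpa using h2, ?_⟩
              rw [take_join_cons c p ps i h1, hk0, h3]
            · rintro ⟨i, h1, h2, h3⟩
              rw [take_join_cons c p ps i h1] at h3
              rw [List.cons_eq_cons] at h3
              refine ⟨h3.1, (ih ks').mpr ⟨i, h1, ?_, ?_⟩⟩
              · rw [hp]; simpa using h2
              · rw [hp]; exact h3.2

theorem chars_join_snoc (sep x : List Char) :
    ∀ (ds : List (List Char)), ds ≠ [] →
      PySem.Chars.join sep (ds ++ [x]) = PySem.Chars.join sep ds ++ sep ++ x := by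
  intro ds
  induction ds with
  | nil => intro h; exact absurd rfl h
  | cons d ds ih =>
      intro _
      cases ds with
      | nil => simp [PySem.Chars.join_cons_cons, PySem.Chars.join_singleton]
      | cons e rest =>
          have := ih (by simp)
          simp only [List.cons_append, PySem.Chars.join_cons_cons] at this ⊢
          simp [this]

theorem str_join_snoc (done : List String) (h : done ≠ []) (y : String) :
    PySem.Str.join "-" [PySem.Str.join "-" done, y] = PySem.Str.join "-" (done ++ [y]) := by
  apply String.toList_inj.mp
  simp only [PySem.Str.toList_join, List.map_cons, List.map_nil, List.map_append,
    PySem.Chars.join_cons_cons, PySem.Chars.join_singleton]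
  rw [chars_join_snoc _ _ _ (by simpa using h)]


theorem fold_none (value : String) : ∀ (items : List (String × String)) (b : Option (String × String)),
    (∀ p ∈ items, PySem.Str.startswith value (p.1 ++ "-") = false) →
    items.foldl (lookup_master_bestStep value) b = b := by
  intro items
  induction items with
  | nil => intro b _; rfl
  | cons p ps ih =>
      intro b h
      rw [List.foldl_cons]
      have hp := h p (by simp)
      have hp' : PySem.Chars.startswith value.toList (p.1.toList ++ ['-']) = false := by
        simpa using hp
      rw [show lookup_master_bestStep value b p = b by
        simp [lookup_master_bestStep, hp']]
      exact ih b (fun q hq => h q (by simp [hq]))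

theorem fold_stable (value : String) (q0 : String × String) :
    ∀ (items : List (String × String)),
    (∀ p ∈ items, PySem.Str.startswith value (p.1 ++ "-") = true →
        p.1.toList.length ≤ q0.1.toList.length) →
    items.foldl (lookup_master_bestStep value) (some q0) = some q0 := by
  intro items
  induction items with
  | nil => intro _; rfl
  | cons p ps ih =>
      intro h
      rw [List.foldl_cons]
      have hstep : lookup_master_bestStep value (some q0) p = some q0 := by
        unfold lookup_master_bestStep
        cases hs : PySem.Str.startswith value (p.1 ++ "-") with
        | false => simp
        | true =>
            have := h p (by simp) hs
            simp only [PySem.Str.len_eq]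
            rw [if_neg]
            simp only [Bool.and_eq_true, decide_eq_true_eq]
            omega
      rw [hstep]
      exact ih (fun q hq => h q (by simp [hq]))

theorem fold_hit (value k : String) (Ks : List String)
    (hkK : k ∈ Ks)
    (hK : ∀ s ∈ Ks, s ≠ k → s.toList.length < k.toList.length) :
    ∀ (items : List (String × String)) (b : Option (String × String)) (q0 : String × String),
    items.find? (fun q => q.1 == k) = some q0 →
    (∀ p ∈ items, PySem.Str.startswith value (p.1 ++ "-") = true ↔ p.1 ∈ Ks) →
    (b = none ∨ ∃ qb, b = some qb ∧ qb.1.toList.length < k.toList.length) →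
    items.foldl (lookup_master_bestStep value) b = some q0 := by
  intro items
  induction items with
  | nil => intro b q0 hfind _ _; simp at hfind
  | cons p ps ih =>
      intro b q0 hfind hmem hb
      by_cases hpk : p.1 = k
      · have hfind' : (p :: ps).find? (fun q => q.1 == k) = some p :=
          List.find?_cons_of_pos (by simp [hpk])
        rw [hfind'] at hfind
        obtain rfl : p = q0 := by injection hfind
        rw [List.foldl_cons]
        have hsw : PySem.Str.startswith value (p.1 ++ "-") = true :=
          (hmem p (by simp)).mpr (hpk ▸ hkK)
        have hstep : lookup_master_bestStep value b p = some p := by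
          unfold lookup_master_bestStep
          rcases hb with rfl | ⟨qb, rfl, hlen⟩
          · rw [hsw]; simp
          · rw [hsw]
            rw [if_pos]
            simp only [Bool.true_and, PySem.Str.len_eq, decide_eq_true_eq]
            rw [hpk]; omega
        rw [hstep]
        apply fold_stable
        intro r hr hrs
        have := (hmem r (by simp [hr])).mp hrs
        by_cases hrk : r.1 = k
        · rw [hrk, hpk]
        · rw [hpk]; exact le_of_lt (hK r.1 this hrk)
      · have hfind' : (p :: ps).find? (fun q => q.1 == k) = ps.find? (fun q => q.1 == k) :=
          List.find?_cons_of_neg (by simp [hpk])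
        rw [hfind'] at hfind
        rw [List.foldl_cons]
        apply ih _ q0 hfind (fun r hr => hmem r (by simp [hr]))
        unfold lookup_master_bestStep
        cases hs : PySem.Str.startswith value (p.1 ++ "-") with
        | false =>
            simp only [Bool.false_and, if_neg Bool.false_ne_true]
            exact hb
        | true =>
            have hmem' := (hmem p (by simp)).mp hs
            have hlt : p.1.toList.length < k.toList.length := hK p.1 hmem' hpk
            split_ifs
            · right; exact ⟨p, rfl, hlt⟩
            · exact hb

theorem fold_eq_scan (value : String) :
    ∀ (Ks : List String) (items : List (String × String)),
    Ks.Pairwise (fun a b => b.toList.length < a.toList.length) →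
    (∀ p ∈ items, PySem.Str.startswith value (p.1 ++ "-") = true ↔ p.1 ∈ Ks) →
    (match items.foldl (lookup_master_bestStep value) none with
      | some p => p.2
      | none => "")
    = (match Ks.find? (fun s => (items.find? (fun q => q.1 == s)).isSome) with
        | some k => ((items.find? (fun q => q.1 == k)).map (fun q => q.2)).getD ""
        | none => "") := by
  intro Ks
  induction Ks with
  | nil =>
      intro items _ hmem
      rw [fold_none value items none (fun p hp => by
        have := hmem p hp
        simp only [List.not_mem_nil, iff_false] at this
        exact Bool.eq_false_iff.mpr this)]
      rfl
  | cons k Ks' ih =>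
      intro items hsorted hmem
      cases hf : items.find? (fun q => q.1 == k) with
      | some q0 =>
          have hKlen : ∀ s ∈ k :: Ks', s ≠ k → s.toList.length < k.toList.length := by
            intro s hs hne
            rcases List.mem_cons.mp hs with rfl | hs'
            · exact absurd rfl hne
            · exact (List.pairwise_cons.mp hsorted).1 s hs'
          rw [fold_hit value k (k :: Ks') (by simp) hKlen items none q0 hf hmem (Or.inl rfl)]
          rw [List.find?_cons_of_pos (by simp [hf])]
          simp [hf]
      | none =>
          have hnot : ∀ p ∈ items, ¬(p.1 == k) = true := List.find?_eq_none.mp hf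
          have hmem' : ∀ p ∈ items, PySem.Str.startswith value (p.1 ++ "-") = true ↔ p.1 ∈ Ks' := by
            intro p hp
            rw [hmem p hp]
            have := hnot p hp
            simp at this
            simp [this]
          rw [ih items hsorted.of_cons hmem']
          rw [List.find?_cons_of_neg (by simp [hf])]

def pvScan (d : PySem.Dict String String) : List String → String
  | [] => ""
  | p :: rest =>
      match d.get? p with
      | some v => v
      | none => pvScan d rest

theorem pvScan_eq_find (d : PySem.Dict String String) : ∀ Ks : List String,
    pvScan d Ks
      = (match Ks.find? (fun s => (d.items.find? (fun q => q.1 == s)).isSome) with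
          | some k => ((d.items.find? (fun q => q.1 == k)).map (fun q => q.2)).getD ""
          | none => "") := by
  intro Ks
  induction Ks with
  | nil => rfl
  | cons p rest ih =>
      show (match d.get? p with | some v => v | none => pvScan d rest) = _
      rw [PySem.Dict.get?]
      cases hf : d.items.find? (fun q => q.1 == p) with
      | some q0 =>
          rw [List.find?_cons_of_pos (by simp [hf])]
          simp [hf]
      | none =>
          rw [List.find?_cons_of_neg (by simp [hf])]
          simpa [hf] using ih

theorem str_join_len_snoc (done : List String) (h : done ≠ []) (y : String) :
    (PySem.Str.join "-" (done ++ [y])).toList.length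
      = (PySem.Str.join "-" done).toList.length + 1 + y.toList.length := by
  rw [← str_join_snoc done h y]
  rw [PySem.Str.toList_join]
  simp only [List.map_cons, List.map_nil, PySem.Chars.join_cons_cons, PySem.Chars.join_singleton]
  simp [PySem.Str.toList_join]
  omega

theorem join_len_mono (parts : List String) : ∀ (b a : Nat), 1 ≤ a → a < b → b ≤ parts.length →
    (PySem.Str.join "-" (parts.take a)).toList.length
      < (PySem.Str.join "-" (parts.take b)).toList.length := by
  intro b
  induction b with
  | zero => intro a _ h _; omega
  | succ b' ih =>
      intro a h1 h2 h3
      have hb' : b' < parts.length := by omega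
      have htake : parts.take (b' + 1) = parts.take b' ++ [parts[b']] := by
        rw [List.take_succ]
        simp [List.getElem?_eq_getElem hb']
      have hne : parts.take b' ≠ [] := by
        have : (parts.take b').length = b' := by rw [List.length_take]; omega
        intro hnil; rw [hnil] at this; simp at this; omega
      have hstep := str_join_len_snoc (parts.take b') hne parts[b']
      rw [htake, hstep]
      by_cases hab : a = b'
      · subst hab; omega
      · have := ih a h1 (by omega) (by omega)
        omega

-- first-hit scan used to restate A's fuzzy loop (proof-side helper)
theorem fuzzyA_eq_scan (d : PySem.Dict String String) (parts : List String) :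
    ∀ (is : List Int), lookup_master_fuzzyA d parts is
      = pvScan d
          (is.map (fun i => PySem.Str.join "-" (PySem.List.slice parts none (some i)))) := by
  intro is
  induction is with
  | nil => rfl
  | cons i rest ih =>
      simp only [lookup_master_fuzzyA, List.map_cons, pvScan]
      cases d.get? (PySem.Str.join "-" (PySem.List.slice parts none (some i))) with
      | some v => rfl
      | none => exact ih

theorem Ks_sorted (p0 : String) (rest : List String) :
    ((List.range rest.length).map
        (fun k => PySem.Str.join "-" ((p0 :: rest).take (rest.length - k)))).Pairwise
      (fun a b => b.toList.length < a.toList.length) := by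
  rw [List.pairwise_map, List.pairwise_iff_getElem]
  intro i j hi hj hij
  simp only [List.length_range] at hi hj
  simp only [List.getElem_range]
  apply join_len_mono (p0 :: rest) (rest.length - i) (rest.length - j) (by omega) (by omega)
  simp; omega

theorem fuzzyA_as_scan (d : PySem.Dict String String) (p : String) (rest : List String) :
    lookup_master_fuzzyA d (p :: rest)
        (PySem.List.pyRange (((p :: rest).length : Int) - 1) 0 (-1))
      = pvScan d ((List.range rest.length).map
          (fun k => PySem.Str.join "-" ((p :: rest).take (rest.length - k)))) := by
  set n := rest.length with hn
  rw [fuzzyA_eq_scan]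
  congr 1
  have h1 : ((p :: rest).length : Int) - 1 = (n : Int) := by
    rw [List.length_cons, hn]; push_cast; ring
  rw [h1, PySem.List.pyRange_neg_one]
  have h0 : ((n : Int) - 0).toNat = n := by omega
  rw [h0, List.map_map]
  apply List.map_congr_left
  intro k hk
  have hk' : k < n := List.mem_range.mp hk
  have h2 : (n : Int) - (k : Int) = ((n - k : Nat) : Int) := by omega
  simp only [Function.comp_apply, h2, PySem.List.slice_to_natCast]

theorem mem_Ks (value : String) (parts : List String) (p0 : String) (rest : List String)
    (hp : parts = p0 :: rest)
    (hparts : parts.map String.toList = pvSplit value.toList) :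
    ∀ s : String, (PySem.Str.startswith value (s ++ "-") = true ↔
      s ∈ (List.range rest.length).map
        (fun k => PySem.Str.join "-" (parts.take (rest.length - k)))) := by
  intro s
  have hlenp : (pvSplit value.toList).length = rest.length + 1 := by
    rw [← hparts, hp]; simp
  have hdash : (("-" : String)).toList = ['-'] := by decide
  rw [PySem.Str.startswith_eq, String.toList_append, hdash, PySem.Chars.startswith_iff,
    prefix_char]
  constructor
  · rintro ⟨i, h1, h2, h3⟩
    rw [hlenp] at h2
    refine List.mem_map.mpr ⟨rest.length - i, List.mem_range.mpr (by omega), ?_⟩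
    have hni : rest.length - (rest.length - i) = i := by omega
    rw [hni]
    apply String.toList_inj.mp
    rw [h3, ← hparts, ← List.map_take, PySem.Str.toList_join, hdash]
  · intro hmem
    obtain ⟨k, hk, rfl⟩ := List.mem_map.mp hmem
    have hk' : k < rest.length := List.mem_range.mp hk
    refine ⟨rest.length - k, by omega, by omega, ?_⟩
    rw [← hparts, ← List.map_take, PySem.Str.toList_join, hdash]

theorem ports_agree (value : String) (master_dict : List (String × String)) (fuzzy : Bool) :
    lookup_master value master_dict fuzzy = lookup_master_alt value master_dict fuzzy := by
  by_cases hv : value = ""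
  · simp [lookup_master, lookup_master_alt, hv]
  · simp only [lookup_master, lookup_master_alt, if_neg hv]
    cases hget : (PySem.Dict.ofList master_dict).get? value with
    | some v => simp
    | none =>
      simp only []
      cases fuzzy with
      | false => rfl
      | true =>
        simp only [if_true]
        set d := PySem.Dict.ofList master_dict with hd
        set parts := (PySem.Str.split? value "-").getD [] with hpartsdef
        -- bridge: parts is exactly pvSplit of value's characters
        have hsplit? : PySem.Str.split? value "-" = some ((PySem.Str.split? value "-").getD []) ∧
            ((PySem.Str.split? value "-").getD []).map String.toList = pvSplit value.toList := by
          have hb := PySem.Str.split?_map value "-"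
          have hdash : (("-" : String)).toList = ['-'] := by decide
          rw [hdash] at hb
          rw [show PySem.Chars.split? value.toList ['-'] = some (pvSplit value.toList) by
            rw [PySem.Chars.split?]; simp [splitOn_eq_pvSplit]] at hb
          cases hsp : PySem.Str.split? value "-" with
          | none => rw [hsp] at hb; simp at hb
          | some ps =>
              rw [hsp] at hb
              simp only [Option.map_some, Option.some_inj] at hb
              exact ⟨by simp, by simpa using hb⟩
        have hparts : parts.map String.toList = pvSplit value.toList := hsplit?.2
        have hpne : parts ≠ [] := by
          intro h
          have := hparts
          rw [h] at this
          exact pvSplit_ne_nil value.toList this.symm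
        obtain ⟨p0, rest, hp⟩ : ∃ p0 rest, parts = p0 :: rest := by
          cases hpp : parts with
          | nil => exact absurd hpp hpne
          | cons a b => exact ⟨a, b, rfl⟩
        rw [hp]
        rw [fuzzyA_as_scan d p0 rest, pvScan_eq_find]
        rw [fold_eq_scan value
          ((List.range rest.length).map
            (fun k => PySem.Str.join "-" ((p0 :: rest).take (rest.length - k))))
          d.items (Ks_sorted p0 rest)
          (fun p _ => by rw [← hp]; exact mem_Ks value parts p0 rest hp hparts p.1)]

-- ===== VERDICT (by name: the statement is the Claim_ definition above) =====
theorem lookup_master_spec : Claim_equal_lookup_master := by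
  intro value master_dict fuzzy _
  exact ports_agree value master_dict fuzzy
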